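-- pv_equiv track=rewrite | github.com/Aerysaint/Paddy | Challenge 1B/chunker.py | _combine_content_parts
-- ===== SOURCE A (Python) =====
-- from typing import List, Dict, Any, Optional
--
-- def _combine_content_parts(content_parts: List[str]) -> str:
--     """
--     Combine multiple content parts into a coherent text block.
--
--     Args:
--         content_parts: List of content strings to combine
--
--     Returns:
--         Combined content string
--     """
--     if not content_parts:
--         return ""
--
--     # Remove duplicates while preserving order
--     seen = set()
--     unique_parts = []
--     for part in content_parts:
--         part_clean = part.strip()
--         if part_clean and part_clean not in seen:
--             seen.add(part_clean)
--             unique_parts.append(part_clean)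
--
--     # Combine with appropriate separators
--     combined = []
--     for i, part in enumerate(unique_parts):
--         if i == 0:
--             combined.append(part)
--         elif part.startswith(':') or part.startswith('-'):
--             # This is likely a continuation or list item
--             combined.append(f" {part}")
--         else:
--             # This is likely a new sentence or section
--             combined.append(f"; {part}")
--
--     return "".join(combined)
-- ===== SOURCE B (Python) =====
-- def _combine_content_parts(content_parts):
--     # Different algorithm: no seen-set and no index counter. Strip/drop-empty once,
--     # then repeatedly emit the head and DELETE all its later duplicates from the rest.
--     ps = [q for q in (p.strip() for p in content_parts) if q]
--     if not ps:
--         return ""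
--     out = ps[0]
--     ps = [q for q in ps[1:] if q != out]
--     while ps:
--         h = ps[0]
--         out += (" " if h.startswith(':') or h.startswith('-') else "; ") + h
--         ps = [q for q in ps[1:] if q != h]
--     return out
-- ===== Notes on version B (the rewrite author's own statement) =====
-- stated objective: alternative
-- what changed: Replaces A's seen-set dedup pass plus enumerate-indexed separator pass with a worklist loop that emits the current head and deletes all of its later duplicates from the remaining list, so no set and no index exist at all.
import Mathlib
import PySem

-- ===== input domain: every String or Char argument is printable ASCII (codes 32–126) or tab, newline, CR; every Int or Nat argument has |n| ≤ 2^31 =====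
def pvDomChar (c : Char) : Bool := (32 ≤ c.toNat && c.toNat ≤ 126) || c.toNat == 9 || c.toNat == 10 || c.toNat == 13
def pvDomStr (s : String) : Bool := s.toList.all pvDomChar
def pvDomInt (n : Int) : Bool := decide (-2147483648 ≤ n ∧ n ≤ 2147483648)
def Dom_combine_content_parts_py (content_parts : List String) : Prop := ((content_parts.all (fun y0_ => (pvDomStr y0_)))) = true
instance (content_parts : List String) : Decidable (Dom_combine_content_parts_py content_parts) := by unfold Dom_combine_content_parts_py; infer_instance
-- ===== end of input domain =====

-- B drops A's seen-set and index counter entirely: it strips/drops empties once, then a worklist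
-- loop emits the head and deletes all its later duplicates from the rest (alternative algorithm, same result).

-- ===== PORT A =====
def combine_content_parts_py (content_parts : List String) : String :=
  if content_parts = [] then ""
  else
    -- first loop: remove duplicates while preserving order
    let st := content_parts.foldl (fun (st : PySem.Set String × List String) part =>
      let part_clean := PySem.Str.strip part
      if part_clean ≠ "" ∧ ¬ st.1.contains part_clean then
        (st.1.add part_clean, st.2 ++ [part_clean])
      else st) (PySem.Set.empty, [])
    -- second loop: combine with appropriate separators, by enumerate index
    let combined := (PySem.List.enumerate st.2).foldl (fun (acc : List String) ip =>
      if ip.1 = 0 then acc ++ [ip.2]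
      else if PySem.Str.startswith ip.2 ":" || PySem.Str.startswith ip.2 "-" then
        acc ++ [" " ++ ip.2]
      else acc ++ ["; " ++ ip.2]) []
    PySem.Str.join "" combined

-- ===== PORT B =====
-- the while loop of Source B: append the head with its separator, delete its later duplicates from the rest
def pvJoinLoop (ps : List String) (out : String) : String :=
  match ps with
  | [] => out
  | h :: t =>
      pvJoinLoop (t.filter (fun q => q ≠ h))
        (out ++ ((if PySem.Str.startswith h ":" || PySem.Str.startswith h "-" then " " else "; ") ++ h))
termination_by ps.length
decreasing_by simpa using (List.length_filter_le _ _).trans (le_of_eq List.length_attach)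

def combine_content_parts_py_alt (content_parts : List String) : String :=
  let ps := (content_parts.map PySem.Str.strip).filter (fun q => q ≠ "")
  match ps with
  | [] => ""
  | h :: t => pvJoinLoop (t.filter (fun q => q ≠ h)) h

-- ===== PRECONDITION & SPEC =====
def Spec_combine_content_parts_py (content_parts : List String) (out : String) : Prop := out = combine_content_parts_py_alt content_parts
instance (content_parts : List String) (out : String) : Decidable (Spec_combine_content_parts_py content_parts out) := by unfold Spec_combine_content_parts_py; infer_instance

-- ===== CLAIM =====
def Claim_equal_combine_content_parts_py : Prop := ∀ (content_parts : List String), Dom_combine_content_parts_py content_parts → Spec_combine_content_parts_py content_parts (combine_content_parts_py content_parts)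

-- ===== LEMMAS AND PROOFS =====

-- decoration of one non-first part, as chosen by both programs
def pvDec (p : String) : String :=
  if PySem.Str.startswith p ":" || PySem.Str.startswith p "-" then " " ++ p else "; " ++ p

-- decorate a whole unique_parts list: first element bare, the rest via pvDec
def pvDecorate : List String → List String
  | [] => []
  | x :: xs => x :: xs.map pvDec

-- filter-style dedup: keep the head, delete its later duplicates (what B's worklist consumes)
def pvDedupF (l : List String) : List String :=
  match l with
  | [] => []
  | h :: t => h :: pvDedupF (t.filter (fun q => q ≠ h))
termination_by l.length
decreasing_by simpa using (List.length_filter_le _ _).trans (le_of_eq List.length_attach)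

-- seen-list form of A's first loop
def pvDedupAux : List String → List String → List String
  | [], _ => []
  | p :: ps, seen =>
    let c := PySem.Str.strip p
    if c = "" ∨ c ∈ seen then pvDedupAux ps seen
    else c :: pvDedupAux ps (seen ++ [c])

theorem pvJoin_nil : PySem.Str.join "" ([] : List String) = "" := by
  rfl

theorem pvJoin_cons (x : String) (xs : List String) :
    PySem.Str.join "" (x :: xs) = x ++ PySem.Str.join "" xs := by
  rw [← String.toList_inj]
  cases xs <;> simp [PySem.Chars.join, List.intercalate]

-- A's second loop over enumerate, starting at a positive index, maps pvDec over the tail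
theorem pvFoldl_enumerate_pos (u : List String) (s : Int) (acc : List String) (hs : 1 ≤ s) :
    (PySem.List.enumerate u s).foldl (fun (acc : List String) ip =>
      if ip.1 = 0 then acc ++ [ip.2]
      else if PySem.Str.startswith ip.2 ":" || PySem.Str.startswith ip.2 "-" then
        acc ++ [" " ++ ip.2]
      else acc ++ ["; " ++ ip.2]) acc = acc ++ u.map pvDec := by
  induction u generalizing s acc with
  | nil => simp [PySem.List.enumerate_nil]
  | cons x xs ih =>
    rw [PySem.List.enumerate_cons]
    simp only [List.foldl_cons]
    have hne : ¬ (s = 0) := by omega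
    rw [if_neg hne, ih (s + 1) _ (by omega)]
    simp [pvDec]
    split <;> simp

-- A's second loop computes pvDecorate of unique_parts
theorem pvSecondLoop (u : List String) :
    (PySem.List.enumerate u).foldl (fun (acc : List String) ip =>
      if ip.1 = 0 then acc ++ [ip.2]
      else if PySem.Str.startswith ip.2 ":" || PySem.Str.startswith ip.2 "-" then
        acc ++ [" " ++ ip.2]
      else acc ++ ["; " ++ ip.2]) [] = pvDecorate u := by
  cases u with
  | nil => rfl
  | cons x xs =>
    rw [PySem.List.enumerate_cons]
    simp only [List.foldl_cons, reduceIte, List.nil_append]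
    rw [pvFoldl_enumerate_pos xs (0 + 1) _ (by omega)]
    simp [pvDecorate]

-- A's first loop, with the seen set characterised by the already-emitted list
theorem pvFirstLoop (parts : List String) (seen : PySem.Set String) (u : List String)
    (H : ∀ x, seen.contains x = true ↔ x ∈ u) :
    (parts.foldl (fun (st : PySem.Set String × List String) part =>
      let part_clean := PySem.Str.strip part
      if part_clean ≠ "" ∧ ¬ st.1.contains part_clean then
        (st.1.add part_clean, st.2 ++ [part_clean])
      else st) (seen, u)).2 = u ++ pvDedupAux parts u := by
  induction parts generalizing seen u with
  | nil => simp [pvDedupAux]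
  | cons p ps ih =>
    simp only [List.foldl_cons, pvDedupAux]
    by_cases h : PySem.Str.strip p = "" ∨ PySem.Str.strip p ∈ u
    · have h' : ¬ (PySem.Str.strip p ≠ "" ∧ ¬ (seen.contains (PySem.Str.strip p) = true)) := by
        rcases h with h | h
        · intro hc; exact hc.1 h
        · intro hc; exact hc.2 ((H _).mpr h)
      rw [if_neg h', if_pos h]
      exact ih seen u H
    · push Not at h
      have h' : PySem.Str.strip p ≠ "" ∧ ¬ (seen.contains (PySem.Str.strip p) = true) := by
        refine ⟨h.1, fun hc => h.2 ((H _).mp hc)⟩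
      rw [if_pos h', if_neg (not_or_intro h.1 h.2)]
      rw [ih (seen.add (PySem.Str.strip p)) (u ++ [PySem.Str.strip p])
        (by intro x
            rw [PySem.Set.contains_iff, PySem.Set.mem_add]
            simp [← H x])]
      simp

-- A's seen-list dedup equals B's filter-style dedup (after removing the already-seen parts)
theorem pvDedupAux_eq (parts : List String) (seen : List String) :
    pvDedupAux parts seen =
      pvDedupF (((parts.map PySem.Str.strip).filter (fun q => q ≠ "")).filter
        (fun q => q ∉ seen)) := by
  induction parts generalizing seen with
  | nil =>
    simp only [List.map_nil, List.filter_nil]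
    rw [pvDedupF]
    rfl
  | cons p ps ih =>
    simp only [pvDedupAux]
    by_cases h0 : PySem.Str.strip p = ""
    · rw [if_pos (Or.inl h0)]
      have e : (((p :: ps).map PySem.Str.strip).filter (fun q => q ≠ "")) =
          ((ps.map PySem.Str.strip).filter (fun q => q ≠ "")) := by
        simp [h0]
      rw [e]
      exact ih seen
    · by_cases h1 : PySem.Str.strip p ∈ seen
      · rw [if_pos (Or.inr h1)]
        have e : ((((p :: ps).map PySem.Str.strip).filter (fun q => q ≠ "")).filter
            (fun q => q ∉ seen)) =
            (((ps.map PySem.Str.strip).filter (fun q => q ≠ "")).filter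
            (fun q => q ∉ seen)) := by
          simp [h0, h1]
        rw [e]
        exact ih seen
      · rw [if_neg (not_or_intro h0 h1)]
        have e : ((((p :: ps).map PySem.Str.strip).filter (fun q => q ≠ "")).filter
            (fun q => q ∉ seen)) =
            PySem.Str.strip p ::
              (((ps.map PySem.Str.strip).filter (fun q => q ≠ "")).filter
              (fun q => q ∉ seen)) := by
          simp [h0, h1]
        rw [e, pvDedupF]
        have e2 : ((((ps.map PySem.Str.strip).filter (fun q => q ≠ "")).filter
            (fun q => q ∉ seen)).filter (fun q => q ≠ PySem.Str.strip p)) =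
            (((ps.map PySem.Str.strip).filter (fun q => q ≠ "")).filter
            (fun q => q ∉ seen ++ [PySem.Str.strip p])) := by
          rw [List.filter_filter]
          apply List.filter_congr
          intro q _
          simp only [List.mem_append, List.mem_singleton, not_or]
          by_cases hq : q ∈ seen <;> by_cases hq2 : q = PySem.Str.strip p <;>
            simp [hq, hq2]
        rw [e2]
        rw [ih (seen ++ [PySem.Str.strip p])]

-- B's worklist loop appends the decorated dedup of its argument
theorem pvJoinLoop_eq_aux (n : Nat) : ∀ (ps : List String) (out : String), ps.length ≤ n →
    pvJoinLoop ps out = out ++ PySem.Str.join "" ((pvDedupF ps).map pvDec) := by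
  induction n with
  | zero =>
    intro ps out hn
    have hps : ps = [] := List.length_eq_zero_iff.mp (Nat.le_zero.mp hn)
    subst hps
    rw [pvJoinLoop, pvDedupF]
    simp [pvJoin_nil]
  | succ n ihn =>
    intro ps out hn
    cases ps with
    | nil =>
      rw [pvJoinLoop, pvDedupF]
      simp [pvJoin_nil]
    | cons h t =>
      rw [pvJoinLoop, pvDedupF]
      have hd : (if PySem.Str.startswith h ":" || PySem.Str.startswith h "-" then " " else "; ") ++ h
          = pvDec h := by
        unfold pvDec
        split <;> rfl
      have ht : t.length ≤ n := by simpa using hn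
      rw [hd, ihn _ _ ((List.length_filter_le _ _).trans ht)]
      simp [pvJoin_cons, String.append_assoc]

theorem pvJoinLoop_eq (ps : List String) (out : String) :
    pvJoinLoop ps out = out ++ PySem.Str.join "" ((pvDedupF ps).map pvDec) :=
  pvJoinLoop_eq_aux ps.length ps out le_rfl

-- ===== VERDICT =====
theorem combine_content_parts_py_spec : Claim_equal_combine_content_parts_py := by
  intro parts _
  unfold Spec_combine_content_parts_py combine_content_parts_py combine_content_parts_py_alt
  cases parts with
  | nil => rfl
  | cons p ps =>
    simp only [reduceCtorEq, ite_false]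
    rw [pvSecondLoop]
    rw [pvFirstLoop (p :: ps) PySem.Set.empty [] (by intro x; simp [PySem.Set.empty])]
    rw [List.nil_append, pvDedupAux_eq (p :: ps) []]
    have e : ((((p :: ps).map PySem.Str.strip).filter (fun q => q ≠ "")).filter
        (fun q => q ∉ ([] : List String))) =
        (((p :: ps).map PySem.Str.strip).filter (fun q => q ≠ "")) := by
      simp
    rw [e]
    cases hcf : (((p :: ps).map PySem.Str.strip).filter (fun q => q ≠ "")) with
    | nil =>
      rw [pvDedupF]
      rfl
    | cons h t =>
      rw [pvDedupF]
      simp only [pvDecorate]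
      rw [pvJoin_cons, pvJoinLoop_eq]
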